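-- pv_equiv track=rewrite | github.com/romankurnovskii/leetcode-apps | solutions/3673/01.py | sumWeightedModes
-- ===== SOURCE A (Python) =====
-- from typing import List
--
-- def sumWeightedModes(nums: List[int]) -> int:
--     from collections import Counter
--
--     count = Counter(nums)
--     max_freq = max(count.values()) if count else 0
--
--     res = 0
--     for num, freq in count.items():
--         if freq == max_freq:
--             res += num * freq
--
--     return res
-- ===== SOURCE B (Python) =====
-- from typing import List
--
-- def sumWeightedModes(nums: List[int]) -> int:
--     from collections import Counter
--
--     count = Counter(nums)
--     if not count:
--         return 0
--
--     group = {}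
--     for num, freq in count.items():
--         group[freq] = group.get(freq, 0) + num * freq
--
--     return group[max(count.values())]
-- ===== Notes on version B (the rewrite author's own statement) =====
-- stated objective: alternative
-- what changed: Instead of computing the max frequency and then filtering items by it, B inverts the counter into a frequency-indexed table of accumulated num*freq sums and answers with a single lookup at the max frequency.
import Mathlib
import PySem

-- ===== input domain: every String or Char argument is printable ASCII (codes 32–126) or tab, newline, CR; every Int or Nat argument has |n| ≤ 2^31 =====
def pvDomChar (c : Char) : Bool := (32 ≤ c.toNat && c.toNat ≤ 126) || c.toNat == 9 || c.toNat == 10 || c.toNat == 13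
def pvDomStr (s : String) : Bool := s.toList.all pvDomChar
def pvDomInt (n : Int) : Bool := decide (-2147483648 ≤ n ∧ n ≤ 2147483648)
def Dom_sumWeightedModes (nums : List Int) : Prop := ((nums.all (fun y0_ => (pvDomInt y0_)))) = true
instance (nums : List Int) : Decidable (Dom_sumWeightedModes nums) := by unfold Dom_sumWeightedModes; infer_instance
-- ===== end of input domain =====

-- B replaces A's max-then-filter pass with a frequency-indexed table of accumulated num*freq sums and a single lookup (alternative decomposition, same cost).
-- ===== PORT A =====
def sumWeightedModes (nums : List Int) : Int :=
  let count := PySem.Dict.counter nums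
  let maxFreq : Int :=
    if count.items.isEmpty then 0
    else (PySem.List.max? count.values (fun y => y)).getD 0
  count.items.foldl (fun res p => if p.2 == maxFreq then res + p.1 * p.2 else res) 0

-- ===== PORT B =====
def sumWeightedModes_alt (nums : List Int) : Int :=
  let count := PySem.Dict.counter nums
  if count.items.isEmpty then 0
  else
    let group := count.items.foldl
      (fun g p => g.insert p.2 (g.getD p.2 0 + p.1 * p.2)) PySem.Dict.empty
    -- group[max(count.values())]: the max frequency is a value of count, hence a key of group; getD's default is unreachable
    group.getD ((PySem.List.max? count.values (fun y => y)).getD 0) 0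

-- ===== PRECONDITION & SPEC =====
def Spec_sumWeightedModes (nums : List Int) (out : Int) : Prop := out = sumWeightedModes_alt nums
instance (nums : List Int) (out : Int) : Decidable (Spec_sumWeightedModes nums out) := by unfold Spec_sumWeightedModes; infer_instance

-- ===== CLAIM (what is proved, stated in full; the proofs are below) =====
def Claim_equal_sumWeightedModes : Prop := ∀ (nums : List Int), Dom_sumWeightedModes nums → Spec_sumWeightedModes nums (sumWeightedModes nums)

-- ===== LEMMAS AND PROOFS =====

-- loop invariant: A's filtered sum over the remaining items equals the growth of B's table entry at m
theorem invert_lemma (l : List (Int × Int)) (m : Int) :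
    ∀ (res : Int) (g : PySem.Dict Int Int),
      l.foldl (fun res p => if p.2 == m then res + p.1 * p.2 else res) res
        = res + ((l.foldl (fun g p => g.insert p.2 (g.getD p.2 0 + p.1 * p.2)) g).getD m 0
                  - g.getD m 0) := by
  induction l with
  | nil => intro res g; simp
  | cons p t ih =>
    intro res g
    simp only [List.foldl_cons]
    have hg : (g.insert p.2 (g.getD p.2 0 + p.1 * p.2)).getD m 0
        = (if (p.2 == m) = true then g.getD m 0 + p.1 * p.2 else g.getD m 0) := by
      by_cases h : m = p.2
      · subst h; simp
      · rw [PySem.Dict.getD_insert, if_neg h,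
            if_neg (show ¬ ((p.2 == m) = true) by simp [Ne.symm h])]
    rw [ih _ (g.insert p.2 (g.getD p.2 0 + p.1 * p.2))]
    simp only [hg]
    by_cases h : (p.2 == m) = true
    · rw [if_pos h, if_pos h]
      ring
    · rw [if_neg h, if_neg h]

-- ===== VERDICT (by name: the statement is the Claim_ definition above) =====
theorem sumWeightedModes_spec : Claim_equal_sumWeightedModes := by
  intro nums _
  unfold Spec_sumWeightedModes sumWeightedModes sumWeightedModes_alt
  by_cases h : (PySem.Dict.counter nums).items.isEmpty
  · have h' : (PySem.Dict.counter nums).items = [] := by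
      simpa [List.isEmpty_iff] using h
    simp [h']
  · simp only [h, Bool.false_eq_true, if_false]
    rw [invert_lemma _ _ 0 PySem.Dict.empty]
    simp [PySem.Dict.getD_empty]
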